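-- pv_equiv track=rewrite | github.com/jordiae/fairseq-factored | preprocessing/babelfy/assign_align_synsets.py | align_synsets_bpe
-- ===== SOURCE A (Python) =====
-- import itertools
--
-- def align_synsets_bpe(synsets, text_bpe):
--     token_index = 0
--     tag_index = 0
--     splitted_text_bpe = text_bpe.split()
--     splitted_synsets = synsets
--     aligned_synsets = ''
--     end_of_lines_positions = list(itertools.accumulate(list(map(lambda x: len(x.split()), text_bpe.splitlines()))))
--     end_of_line_index = 0
--     while token_index < len(splitted_text_bpe):
--         if '@@' in splitted_text_bpe[token_index]:
--             while '@@' in splitted_text_bpe[token_index]: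
--                 aligned_synsets += (splitted_synsets[tag_index])
--                 aligned_synsets += '@@'
--                 aligned_synsets += ' '
--                 token_index += 1
--                 if '@@' not in splitted_text_bpe[token_index]:
--                     aligned_synsets += (splitted_synsets[tag_index])
--                     if token_index == end_of_lines_positions[end_of_line_index] - 1:
--                         aligned_synsets += '\n'
--                         end_of_line_index += 1
--                     else:
--                         aligned_synsets += ' '
--                     token_index += 1
--                     tag_index += 1
--         else:
--             aligned_synsets += (splitted_synsets[tag_index])
--             if token_index == end_of_lines_positions[end_of_line_index] - 1:
--                 aligned_synsets += '\n'
--                 end_of_line_index += 1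
--             else:
--                 aligned_synsets += ' '
--             token_index += 1
--             tag_index += 1
--     return aligned_synsets
-- ===== SOURCE B (Python) =====
-- def align_synsets_bpe(synsets, text_bpe):
--     out = ''
--     tag = 0
--     for line in text_bpe.splitlines():
--         toks = line.split()
--         last = len(toks) - 1
--         for i, tok in enumerate(toks):
--             out += synsets[tag]
--             if '@@' in tok:
--                 out += '@@ '
--             else:
--                 out += '\n' if i == last else ' '
--                 tag += 1
--     return out
-- ===== Notes on version B (the rewrite author's own statement) =====
-- stated objective: simpler
-- what changed: B drops A's flat while-loop with nested '@@' inner loop, the itertools.accumulate end-of-line table and the token_index/end_of_line_index bookkeeping, and instead walks the lines from splitlines() with one running tag index, deriving line ends from the line iteration itself.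
-- intended difference: On texts where some line with no tokens, or whose last token contains '@@', is followed by a later line with tokens, A's end_of_line_index goes stale and A returns a string with spaces where the remaining line breaks belong; B returns the string with a newline after the last token of each line, which is the alignment the function is for. — e.g. on align_synsets_bpe(["A", "B"], "a\n\nb"): A returns "A\nB ", B returns "A\nB\n"
import Mathlib
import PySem

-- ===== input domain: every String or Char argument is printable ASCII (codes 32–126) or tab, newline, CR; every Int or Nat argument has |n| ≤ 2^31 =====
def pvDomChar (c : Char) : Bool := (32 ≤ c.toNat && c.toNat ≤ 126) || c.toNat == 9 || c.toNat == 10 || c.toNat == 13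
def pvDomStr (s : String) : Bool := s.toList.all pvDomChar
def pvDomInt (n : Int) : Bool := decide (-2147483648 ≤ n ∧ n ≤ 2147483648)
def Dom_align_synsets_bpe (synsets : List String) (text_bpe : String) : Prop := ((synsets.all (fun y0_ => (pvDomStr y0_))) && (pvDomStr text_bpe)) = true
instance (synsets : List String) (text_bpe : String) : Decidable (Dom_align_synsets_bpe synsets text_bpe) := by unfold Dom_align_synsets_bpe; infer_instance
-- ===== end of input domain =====

-- B replaces A's flat token scan (nested '@@' while loops + itertools.accumulate end-of-line
-- table + token_index/end_of_line_index bookkeeping) by a single walk over the lines with one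
-- running tag index; return values agree outside D_ below (objective: simpler, not faster).

-- ===== PORT A =====
-- itertools.accumulate (running sums)
def pyAccumGo (t : Int) : List Int → List Int
  | [] => []
  | x :: xs => (t + x) :: pyAccumGo (t + x) xs

def pyAccum (xs : List Int) : List Int := pyAccumGo 0 xs

-- the inner `while '@@' in splitted_text_bpe[token_index]` loop of A; fuel only makes the
-- recursion total (each call strictly advances token_index, so fuel = #tokens + 1 suffices);
-- `none` = the Python raises (IndexError)
def aInner (toks syn : List String) (eops : List Int) : Nat → Nat → Nat → Nat → String → Option (Nat × Nat × Nat × String)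
  | 0, _, _, _, _ => none
  | fuel + 1, ti, tag, eol, acc =>
    match PySem.List.pyGet? toks (ti : Int) with
    | none => none
    | some t =>
      if PySem.Str.isIn "@@" t then
        match PySem.List.pyGet? syn (tag : Int) with
        | none => none
        | some s =>
          match PySem.List.pyGet? toks ((ti + 1 : Nat) : Int) with
          | none => none
          | some t2 =>
            if PySem.Str.isIn "@@" t2 then
              aInner toks syn eops fuel (ti + 1) tag eol (acc ++ s ++ "@@" ++ " ")
            else
              match PySem.List.pyGet? syn (tag : Int) with
              | none => none
              | some s2 =>
                match PySem.List.pyGet? eops (eol : Int) with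
                | none => none
                | some e =>
                  if ((ti + 1 : Nat) : Int) = e - 1 then
                    aInner toks syn eops fuel (ti + 2) (tag + 1) (eol + 1) (acc ++ s ++ "@@" ++ " " ++ s2 ++ "\n")
                  else
                    aInner toks syn eops fuel (ti + 2) (tag + 1) eol (acc ++ s ++ "@@" ++ " " ++ s2 ++ " ")
      else some (ti, tag, eol, acc)

-- the outer `while token_index < len(splitted_text_bpe)` loop of A
def aOuter (toks syn : List String) (eops : List Int) : Nat → Nat → Nat → Nat → String → Option String
  | 0, _, _, _, _ => none
  | fuel + 1, ti, tag, eol, acc =>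
    if ti < toks.length then
      match PySem.List.pyGet? toks (ti : Int) with
      | none => none
      | some t =>
        if PySem.Str.isIn "@@" t then
          match aInner toks syn eops (toks.length + 1) ti tag eol acc with
          | none => none
          | some (ti', tag', eol', acc') => aOuter toks syn eops fuel ti' tag' eol' acc'
        else
          match PySem.List.pyGet? syn (tag : Int) with
          | none => none
          | some s =>
            match PySem.List.pyGet? eops (eol : Int) with
            | none => none
            | some e =>
              if (ti : Int) = e - 1 then aOuter toks syn eops fuel (ti + 1) (tag + 1) (eol + 1) (acc ++ s ++ "\n")
              else aOuter toks syn eops fuel (ti + 1) (tag + 1) eol (acc ++ s ++ " ")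
    else some acc

def align_synsets_bpe (synsets : List String) (text_bpe : String) : String :=
  let splitted_text_bpe := PySem.Str.split₀ text_bpe
  let end_of_lines_positions := pyAccum ((PySem.Str.splitlines text_bpe).map (fun l => ((PySem.Str.split₀ l).length : Int)))
  (aOuter splitted_text_bpe synsets end_of_lines_positions (splitted_text_bpe.length + 1) 0 0 0 "").getD ""

-- ===== PORT B =====
-- the `for i, tok in enumerate(toks)` loop of B (i carried explicitly); `none` = IndexError
def bToks (syn : List String) (last : Int) : List String → Nat → Nat → String → Option (Nat × String)
  | [], _, tag, out => some (tag, out)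
  | tok :: rest, i, tag, out =>
    match PySem.List.pyGet? syn (tag : Int) with
    | none => none
    | some s =>
      if PySem.Str.isIn "@@" tok then bToks syn last rest (i + 1) tag (out ++ s ++ "@@ ")
      else bToks syn last rest (i + 1) (tag + 1) (out ++ s ++ (if (i : Int) = last then "\n" else " "))

-- the `for line in text_bpe.splitlines()` loop of B
def bLines (syn : List String) : List String → Nat → String → Option (Nat × String)
  | [], tag, out => some (tag, out)
  | line :: rest, tag, out =>
    let toks := PySem.Str.split₀ line
    match bToks syn ((toks.length : Int) - 1) toks 0 tag out with
    | none => none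
    | some (tag', out') => bLines syn rest tag' out'

def align_synsets_bpe_alt (synsets : List String) (text_bpe : String) : String :=
  match bLines synsets (PySem.Str.splitlines text_bpe) 0 "" with
  | none => ""
  | some (_, out) => out

-- ===== PRECONDITION & SPEC =====
-- Pre_ = exactly the inputs where the Python A returns normally: it raises IndexError when a
-- '@@' occurs in one of the last two whitespace tokens (it then reads one token past the end)
-- or when there are more non-'@@' tokens than synsets (tag_index overruns the list).
def Pre_align_synsets_bpe (synsets : List String) (text_bpe : String) : Prop :=
  (PySem.Str.split₀ text_bpe).countP (fun t => !PySem.Str.isIn "@@" t) ≤ synsets.length ∧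
  ∀ t ∈ (PySem.Str.split₀ text_bpe).drop ((PySem.Str.split₀ text_bpe).length - 2), PySem.Str.isIn "@@" t = false

instance (synsets : List String) (text_bpe : String) : Decidable (Pre_align_synsets_bpe synsets text_bpe) := by
  unfold Pre_align_synsets_bpe; infer_instance

def pvWitness_align_synsets_bpe : List String × String := (["S1", "S2"], "a b")

-- On texts where a defect line (no tokens, or last token containing '@@') is followed by a later
-- line that has tokens, A's end_of_line_index goes stale and A returns spaces where the remaining
-- line breaks belong; B returns a newline after the last token of every line, which is the
-- alignment the function is for.
def D_align_synsets_bpe (synsets : List String) (text_bpe : String) : Prop :=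
  ∃ j < (PySem.Str.splitlines text_bpe).length,
    PySem.Str.split₀ ((PySem.Str.splitlines text_bpe).getD j "") ≠ [] ∧
    ∃ i < j, ∀ t ∈ (PySem.Str.split₀ ((PySem.Str.splitlines text_bpe).getD i "")).getLast?, PySem.Str.isIn "@@" t = true

instance (synsets : List String) (text_bpe : String) : Decidable (D_align_synsets_bpe synsets text_bpe) := by
  unfold D_align_synsets_bpe; infer_instance

def Spec_align_synsets_bpe (synsets : List String) (text_bpe : String) (out : String) : Prop :=
  ¬ D_align_synsets_bpe synsets text_bpe → out = align_synsets_bpe_alt synsets text_bpe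

instance (synsets : List String) (text_bpe : String) (out : String) : Decidable (Spec_align_synsets_bpe synsets text_bpe out) := by
  unfold Spec_align_synsets_bpe; infer_instance

def pvDiffWitness_align_synsets_bpe : List String × String := (["A", "B"], "a\n\nb")

def pvDiffWitnessOut_align_synsets_bpe : String × String := ("A\nB ", "A\nB\n")

-- ===== CLAIM (what is proved, stated in full; the proofs are below) =====
def Claim_unchanged_align_synsets_bpe : Prop := ∀ (synsets : List String) (text_bpe : String), Dom_align_synsets_bpe synsets text_bpe → Pre_align_synsets_bpe synsets text_bpe → Spec_align_synsets_bpe synsets text_bpe (align_synsets_bpe synsets text_bpe)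

def Claim_changed_align_synsets_bpe : Prop := Dom_align_synsets_bpe (pvDiffWitness_align_synsets_bpe.1) (pvDiffWitness_align_synsets_bpe.2) ∧ Pre_align_synsets_bpe (pvDiffWitness_align_synsets_bpe.1) (pvDiffWitness_align_synsets_bpe.2) ∧ D_align_synsets_bpe (pvDiffWitness_align_synsets_bpe.1) (pvDiffWitness_align_synsets_bpe.2) ∧ align_synsets_bpe (pvDiffWitness_align_synsets_bpe.1) (pvDiffWitness_align_synsets_bpe.2) = pvDiffWitnessOut_align_synsets_bpe.1 ∧ align_synsets_bpe_alt (pvDiffWitness_align_synsets_bpe.1) (pvDiffWitness_align_synsets_bpe.2) = pvDiffWitnessOut_align_synsets_bpe.2 ∧ pvDiffWitnessOut_align_synsets_bpe.1 ≠ pvDiffWitnessOut_align_synsets_bpe.2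


-- ===== LEMMAS AND PROOFS =====

-- ---------------------------------------------------------------------------
-- Part 1: text.split() is the concatenation of line.split() over splitlines()
-- ---------------------------------------------------------------------------

-- the line-break test splitlines uses (definitionally the one inside PySem.Chars.splitlines)
def pvBrk : Char → Bool := fun c =>
  have n := c.toNat
  decide (n = 10) || decide (n = 13) || decide (n = 11) || decide (n = 12) || decide (n = 28) ||
    decide (n = 29) || decide (n = 30) || decide (n = 133) || decide (n = 8232) || decide (n = 8233)

theorem pv_splitlines_eq (cs : List Char) :
    PySem.Chars.splitlines cs = PySem.Chars.splitlines.go pvBrk cs [] [] := rfl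

theorem pvBrk_isspace (c : Char) (h : pvBrk c = true) : PySem.Chars.isspace c = true := by
  simp [pvBrk] at h
  simp [PySem.Chars.isspace]
  omega

theorem pv_sl_go_cons (B : Char → Bool) (c : Char) (cs cur : List Char) (acc : List (List Char))
    (h : c = '\r' → cs.head? ≠ some '\n') :
    PySem.Chars.splitlines.go B (c :: cs) cur acc =
      (if B c then PySem.Chars.splitlines.go B cs [] (cur.reverse :: acc)
       else PySem.Chars.splitlines.go B cs (c :: cur) acc) := by
  rw [PySem.Chars.splitlines.go.eq_def]
  split
  · rename_i heq; simp at heq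
  · rename_i rest heq
    injection heq with h1 h2
    subst h1
    exact absurd (by rw [h2]; rfl) (h rfl)
  · rename_i c' rest' heq
    injection heq with h1 h2
    subst h1; subst h2
    rfl

theorem pv_sp_go_acc : ∀ (cs : List Char) (cur : List Char) (acc : List (List Char)),
    PySem.Chars.split₀.go cs cur acc = acc.reverse ++ PySem.Chars.split₀.go cs cur [] := by
  intro cs
  induction cs with
  | nil =>
    intro cur acc
    rw [PySem.Chars.split₀.go, PySem.Chars.split₀.go]
    split_ifs <;> simp
  | cons c cs ih =>
    intro cur acc
    rw [PySem.Chars.split₀.go]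
    conv_rhs => rw [PySem.Chars.split₀.go]
    split_ifs with h1 h2
    · exact ih [] acc
    · rw [ih [] (cur.reverse :: acc), ih [] [cur.reverse]]
      simp
    · exact ih (c :: cur) acc

theorem pv_sl_go_acc (B : Char → Bool) : ∀ (n : Nat) (cs : List Char) (cur : List Char) (acc : List (List Char)),
    cs.length ≤ n →
    PySem.Chars.splitlines.go B cs cur acc = acc.reverse ++ PySem.Chars.splitlines.go B cs cur [] := by
  intro n
  induction n with
  | zero =>
    intro cs cur acc hn
    have : cs = [] := List.length_eq_zero_iff.mp (Nat.le_zero.mp hn)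
    subst this
    rw [PySem.Chars.splitlines.go, PySem.Chars.splitlines.go]
    split_ifs <;> simp
  | succ n ih =>
    intro cs cur acc hn
    match cs with
    | [] =>
      rw [PySem.Chars.splitlines.go, PySem.Chars.splitlines.go]
      split_ifs <;> simp
    | '\r' :: '\n' :: cs =>
      rw [PySem.Chars.splitlines.go]
      conv_rhs => rw [PySem.Chars.splitlines.go]
      rw [ih cs [] (cur.reverse :: acc) (by simp at hn; omega), ih cs [] [cur.reverse] (by simp at hn; omega)]
      simp
    | c :: cs' =>
      by_cases hrn : c = '\r' ∧ cs'.head? = some '\n'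
      · obtain ⟨hc, hh⟩ := hrn
        subst hc
        rcases cs' with _ | ⟨c2, cs''⟩
        · simp at hh
        · have hc2 : c2 = '\n' := by simpa using hh
          subst hc2
          rw [PySem.Chars.splitlines.go]
          conv_rhs => rw [PySem.Chars.splitlines.go]
          rw [ih cs'' [] (cur.reverse :: acc) (by simp at hn; omega), ih cs'' [] [cur.reverse] (by simp at hn; omega)]
          simp
      · have hg : c = '\r' → cs'.head? ≠ some '\n' := by
          intro h1 h2; exact hrn ⟨h1, h2⟩
        rw [pv_sl_go_cons B c cs' cur acc hg, pv_sl_go_cons B c cs' cur [] hg]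
        split_ifs with hB
        · rw [ih cs' [] (cur.reverse :: acc) (by simp at hn; omega), ih cs' [] [cur.reverse] (by simp at hn; omega)]
          simp
        · exact ih cs' (c :: cur) acc (by simp at hn; omega)

theorem pv_sp_go_space (s : Char) (hs : PySem.Chars.isspace s = true) :
    ∀ (xs : List Char) (ys cur : List Char) (acc : List (List Char)),
    PySem.Chars.split₀.go (xs ++ s :: ys) cur acc = PySem.Chars.split₀.go xs cur acc ++ PySem.Chars.split₀ ys := by
  intro xs
  induction xs with
  | nil =>
    intro ys cur acc
    simp only [List.nil_append]
    conv_lhs => rw [PySem.Chars.split₀.go]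
    conv_rhs => rw [PySem.Chars.split₀.go]
    rw [if_pos hs]
    split_ifs with hc
    · rw [pv_sp_go_acc ys [] acc]; rfl
    · rw [pv_sp_go_acc ys [] (cur.reverse :: acc)]
      simp [PySem.Chars.split₀]
  | cons c xs ih =>
    intro ys cur acc
    rw [List.cons_append, PySem.Chars.split₀.go]
    conv_rhs => rw [PySem.Chars.split₀.go]
    split_ifs with h1 h2
    · exact ih ys [] acc
    · exact ih ys [] (cur.reverse :: acc)
    · exact ih ys (c :: cur) acc

theorem pv_sp_space_append (s : Char) (hs : PySem.Chars.isspace s = true) (xs ys : List Char) :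
    PySem.Chars.split₀ (xs ++ s :: ys) = PySem.Chars.split₀ xs ++ PySem.Chars.split₀ ys := by
  unfold PySem.Chars.split₀
  exact pv_sp_go_space s hs xs ys [] []

theorem pv_inv : ∀ (n : Nat) (cs cur : List Char), cs.length ≤ n → (∀ c ∈ cur, pvBrk c = false) →
    ((PySem.Chars.splitlines.go pvBrk cs cur []).map PySem.Chars.split₀).flatten =
      PySem.Chars.split₀ (cur.reverse ++ cs) := by
  intro n
  induction n with
  | zero =>
    intro cs cur hn hcur
    have : cs = [] := List.length_eq_zero_iff.mp (Nat.le_zero.mp hn)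
    subst this
    rw [PySem.Chars.splitlines.go]
    rcases cur with _ | ⟨c, cur⟩
    · simp [PySem.Chars.split₀]
      rw [PySem.Chars.split₀.go]
      rfl
    · simp
  | succ n ih =>
    intro cs cur hn hcur
    match cs with
    | [] =>
      rw [PySem.Chars.splitlines.go]
      rcases cur with _ | ⟨c, cur⟩
      · simp [PySem.Chars.split₀]
        rw [PySem.Chars.split₀.go]
        rfl
      · simp
    | '\r' :: '\n' :: cs =>
      rw [PySem.Chars.splitlines.go]
      rw [pv_sl_go_acc pvBrk (n) cs [] [cur.reverse] (by simp at hn; omega)]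
      rw [pv_sp_space_append '\r' (by decide) cur.reverse ('\n' :: cs)]
      have h2 : PySem.Chars.split₀ ('\n' :: cs) = PySem.Chars.split₀ cs := by
        unfold PySem.Chars.split₀
        conv_lhs => rw [PySem.Chars.split₀.go]
        rfl
      have hI := ih cs [] (by simp at hn; omega) (by simp)
      simp only [List.reverse_nil, List.nil_append] at hI
      rw [h2]
      simp [hI]
    | c :: cs' =>
      by_cases hrn : c = '\r' ∧ cs'.head? = some '\n'
      · obtain ⟨hc, hh⟩ := hrn
        subst hc
        rcases cs' with _ | ⟨c2, cs''⟩
        · simp at hh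
        · have hc2 : c2 = '\n' := by simpa using hh
          subst hc2
          rw [PySem.Chars.splitlines.go]
          rw [pv_sl_go_acc pvBrk (n) cs'' [] [cur.reverse] (by simp at hn; omega)]
          rw [pv_sp_space_append '\r' (by decide) cur.reverse ('\n' :: cs'')]
          have h2 : PySem.Chars.split₀ ('\n' :: cs'') = PySem.Chars.split₀ cs'' := by
            unfold PySem.Chars.split₀
            conv_lhs => rw [PySem.Chars.split₀.go]
            rfl
          have hI := ih cs'' [] (by simp at hn; omega) (by simp)
          simp only [List.reverse_nil, List.nil_append] at hI
          rw [h2]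
          simp [hI]
      · have hg : c = '\r' → cs'.head? ≠ some '\n' := fun h1 h2 => hrn ⟨h1, h2⟩
        rw [pv_sl_go_cons pvBrk c cs' cur [] hg]
        split_ifs with hB
        · rw [pv_sl_go_acc pvBrk (n) cs' [] [cur.reverse] (by simp at hn; omega)]
          rw [pv_sp_space_append c (pvBrk_isspace c hB) cur.reverse cs']
          have hI := ih cs' [] (by simp at hn; omega) (by simp)
          simp only [List.reverse_nil, List.nil_append] at hI
          simp [hI]
        · rw [ih cs' (c :: cur) (by simp at hn; omega)
            (by intro x hx
                rcases List.mem_cons.mp hx with h | h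
                · subst h; simpa using hB
                · exact hcur x h)]
          simp

theorem pv_split_flatten (s : String) :
    PySem.Str.split₀ s = ((PySem.Str.splitlines s).map PySem.Str.split₀).flatten := by
  have h := pv_inv s.toList.length s.toList [] le_rfl (by simp)
  rw [← pv_splitlines_eq s.toList] at h
  simp only [List.reverse_nil, List.nil_append] at h
  show (PySem.Chars.split₀ s.toList).map String.ofList = _
  rw [← h, List.map_flatten]
  unfold PySem.Str.splitlines PySem.Str.split₀
  rw [List.map_map, List.map_map]
  congr 1
  apply List.map_congr_left
  intro l _
  simp

-- ---------------------------------------------------------------------------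
-- Part 2: A's nested while loops compute a flat one-token-at-a-time scan
-- ---------------------------------------------------------------------------

-- the flat per-token scan A's control flow amounts to (proof-side reference)
def fRun (syn : List String) (eops : List Int) : List String → Nat → Nat → Nat → String → Option String
  | [], _, _, _, acc => some acc
  | t :: rest, ti, tag, eol, acc =>
    match PySem.List.pyGet? syn (tag : Int) with
    | none => none
    | some s =>
      if PySem.Str.isIn "@@" t then fRun syn eops rest (ti + 1) tag eol (acc ++ s ++ "@@" ++ " ")
      else
        match PySem.List.pyGet? eops (eol : Int) with
        | none => none
        | some e =>
          if (ti : Int) = e - 1 then fRun syn eops rest (ti + 1) (tag + 1) (eol + 1) (acc ++ s ++ "\n")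
          else fRun syn eops rest (ti + 1) (tag + 1) eol (acc ++ s ++ " ")

-- aInner, re-expressed as structural recursion over the remaining tokens
def innerF (syn : List String) (eops : List Int) : List String → Nat → Nat → Nat → String → Option (Nat × Nat × Nat × String)
  | [], _, _, _, _ => none
  | t :: rest, ti, tag, eol, acc =>
    if PySem.Str.isIn "@@" t then
      match PySem.List.pyGet? syn (tag : Int) with
      | none => none
      | some s =>
        match rest with
        | [] => none
        | t2 :: rest2 =>
          if PySem.Str.isIn "@@" t2 then innerF syn eops (t2 :: rest2) (ti + 1) tag eol (acc ++ s ++ "@@" ++ " ")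
          else
            match PySem.List.pyGet? syn (tag : Int) with
            | none => none
            | some s2 =>
              match PySem.List.pyGet? eops (eol : Int) with
              | none => none
              | some e =>
                if ((ti + 1 : Nat) : Int) = e - 1 then
                  innerF syn eops rest2 (ti + 2) (tag + 1) (eol + 1) (acc ++ s ++ "@@" ++ " " ++ s2 ++ "\n")
                else
                  innerF syn eops rest2 (ti + 2) (tag + 1) eol (acc ++ s ++ "@@" ++ " " ++ s2 ++ " ")
    else some (ti, tag, eol, acc)

theorem pv_tok_get (pre rest : List String) (i : Nat) :
    PySem.List.pyGet? (pre ++ rest) ((pre.length + i : Nat) : Int) = rest[i]? := by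
  rw [PySem.List.pyGet?_natCast]
  rw [List.getElem?_append_right (by omega)]
  congr 1
  omega

-- no '@@' in the last two remaining tokens (exactly Pre_'s second conjunct)
def Ctail (rest : List String) : Prop :=
  ∀ t ∈ rest.drop (rest.length - 2), PySem.Str.isIn "@@" t = false

theorem pv_ctail_tail (t : String) (rest : List String) (h : Ctail (t :: rest)) : Ctail rest := by
  intro x hx
  apply h
  rcases Nat.lt_or_ge rest.length 2 with h2 | h2
  · have : rest.length - 2 = 0 := by omega
    rw [this] at hx
    have : (t :: rest).length - 2 = 0 := by simp; omega
    rw [this]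
    simp at hx ⊢
    exact Or.inr hx
  · have : (t :: rest).length - 2 = (rest.length - 2) + 1 := by simp; omega
    rw [this, List.drop_succ_cons]
    exact hx

theorem pv_ctail_drop (rest : List String) (k : Nat) (h : Ctail rest) : Ctail (rest.drop k) := by
  induction k generalizing rest with
  | zero => simpa using h
  | succ k ih =>
    rcases rest with _ | ⟨t, rest⟩
    · simpa using h
    · rw [List.drop_succ_cons]
      exact ih rest (pv_ctail_tail t rest h)

theorem pv_last_mem_drop : ∀ (l : List String) (t : String), l.getLast? = some t → t ∈ l.drop (l.length - 2) := by
  intro l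
  induction l with
  | nil => intro t ht; simp at ht
  | cons x l ih =>
    intro t ht
    rcases l with _ | ⟨y, l'⟩
    · simp at ht ⊢
      exact ht.symm
    · rw [List.getLast?_cons_cons] at ht
      have hm := ih t ht
      rcases Nat.lt_or_ge (y :: l').length 2 with h2 | h2
      · have h0 : (x :: y :: l').length - 2 = 0 := by simp at h2 ⊢; omega
        rw [h0]
        simp at hm ⊢
        exact Or.inr (by simpa using List.mem_of_mem_drop hm)
      · have h1 : (x :: y :: l').length - 2 = ((y :: l').length - 2) + 1 := by simp at h2 ⊢; omega
        rw [h1, List.drop_succ_cons]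
        exact hm

theorem pv_ctail_last (l : List String) (t : String) (h : Ctail l) (hl : l.getLast? = some t) :
    PySem.Str.isIn "@@" t = false := by
  exact h t (pv_last_mem_drop l t hl)

theorem pv_in : ∀ (fuel : Nat) (pre rest syn : List String) (eops : List Int) (tag eol : Nat) (acc : String),
    rest.length < fuel →
    aInner (pre ++ rest) syn eops fuel pre.length tag eol acc = innerF syn eops rest pre.length tag eol acc := by
  intro fuel
  induction fuel with
  | zero => intro pre rest syn eops tag eol acc h; omega
  | succ fuel ih =>
    intro pre rest syn eops tag eol acc hlen
    rcases rest with _ | ⟨t, rest'⟩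
    · have h0 : PySem.List.pyGet? (pre ++ ([] : List String)) ((pre.length : Nat) : Int) = none := by
        simpa using pv_tok_get pre ([] : List String) 0
      rw [aInner, innerF]
      simp only [h0]
    · have hget : PySem.List.pyGet? (pre ++ t :: rest') ((pre.length : Nat) : Int) = some t := by
        simpa using pv_tok_get pre (t :: rest') 0
      have hget1 : PySem.List.pyGet? (pre ++ t :: rest') ((pre.length + 1 : Nat) : Int) = rest'[0]? := by
        simpa using pv_tok_get pre (t :: rest') 1
      rw [aInner, innerF]
      simp only [hget]
      by_cases h1 : PySem.Str.isIn "@@" t = true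
      · simp only [h1, if_true]
        cases hs : PySem.List.pyGet? syn ((tag : Nat) : Int) with
        | none => rfl
        | some s =>
          simp only [hget1]
          rcases rest' with _ | ⟨t2, rest2⟩
          · simp
          · simp only [List.getElem?_cons_zero]
            by_cases h2 : PySem.Str.isIn "@@" t2 = true
            · simp only [h2, if_true]
              have hre : pre ++ t :: t2 :: rest2 = (pre ++ [t]) ++ (t2 :: rest2) := by simp
              have hlen1 : pre.length + 1 = (pre ++ [t]).length := by simp
              rw [hre, hlen1, ih (pre ++ [t]) (t2 :: rest2) syn eops tag eol _ (by simp at hlen ⊢; omega)]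
            · simp only [h2]
              cases he : PySem.List.pyGet? eops ((eol : Nat) : Int) with
              | none => simp
              | some e =>
                simp only [he]
                have hre : pre ++ t :: t2 :: rest2 = (pre ++ [t, t2]) ++ rest2 := by simp
                have hlen2 : pre.length + 2 = (pre ++ [t, t2]).length := by simp
                by_cases hb : ((pre.length + 1 : Nat) : Int) = e - 1
                · simp only [hb, if_true]
                  rw [hre, hlen2, ih (pre ++ [t, t2]) rest2 syn eops (tag + 1) (eol + 1) _ (by simp at hlen ⊢; omega)]
                  simp
                · simp only [hb, if_false]
                  rw [hre, hlen2, ih (pre ++ [t, t2]) rest2 syn eops (tag + 1) eol _ (by simp at hlen ⊢; omega)]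
                  simp
      · simp only [h1]
        simp

theorem pv_inf : ∀ (n : Nat) (rest syn : List String) (eops : List Int) (ti tag eol : Nat) (acc : String) (t0 : String),
    rest.length ≤ n → Ctail rest → rest.head? = some t0 → PySem.Str.isIn "@@" t0 = true →
    (innerF syn eops rest ti tag eol acc = none → fRun syn eops rest ti tag eol acc = none) ∧
    (∀ ti' tag' eol' acc', innerF syn eops rest ti tag eol acc = some (ti', tag', eol', acc') →
      ti < ti' ∧ ti' - ti ≤ rest.length ∧
      fRun syn eops rest ti tag eol acc = fRun syn eops (rest.drop (ti' - ti)) ti' tag' eol' acc') := by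
  intro n
  induction n with
  | zero =>
    intro rest syn eops ti tag eol acc t0 hn hct hh h0
    have : rest = [] := List.length_eq_zero_iff.mp (Nat.le_zero.mp hn)
    subst this
    simp at hh
  | succ n ih =>
    intro rest syn eops ti tag eol acc t0 hn hct hh h0
    rcases rest with _ | ⟨t, rest'⟩
    · simp at hh
    · have htt : t = t0 := by simpa using hh
      subst htt
      have h0c := h0
      simp at h0c
      cases hs : PySem.List.pyGet? syn ((tag : Nat) : Int) with
      | none =>
        have hIeq : innerF syn eops (t :: rest') ti tag eol acc = none := by
          rw [innerF]; simp [h0c, hs]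
        have hFeq : fRun syn eops (t :: rest') ti tag eol acc = none := by
          rw [fRun]; simp [hs]
        refine ⟨fun _ => hFeq, fun ti' tag' eol' acc' h => ?_⟩
        rw [hIeq] at h; cases h
      | some s =>
        have hF1 : fRun syn eops (t :: rest') ti tag eol acc
            = fRun syn eops rest' (ti + 1) tag eol (acc ++ s ++ "@@" ++ " ") := by
          rw [fRun]; simp [hs, h0c]
        rcases rest' with _ | ⟨t2, rest2⟩
        · have hc := hct t (by simp)
          rw [h0] at hc; cases hc
        · by_cases h2 : PySem.Str.isIn "@@" t2 = true
          · have h2c := h2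
            simp at h2c
            have hIeq : innerF syn eops (t :: t2 :: rest2) ti tag eol acc
                = innerF syn eops (t2 :: rest2) (ti + 1) tag eol (acc ++ s ++ "@@" ++ " ") := by
              rw [innerF]; simp [h0c, hs, h2c]
            have IH := ih (t2 :: rest2) syn eops (ti + 1) tag eol (acc ++ s ++ "@@" ++ " ") t2
              (by simp at hn ⊢; omega) (pv_ctail_tail _ _ hct) (by simp) h2
            refine ⟨fun hnone => ?_, fun ti' tag' eol' acc' hsome => ?_⟩
            · rw [hIeq] at hnone
              rw [hF1]
              exact IH.1 hnone
            · rw [hIeq] at hsome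
              obtain ⟨hlt, hle, heq⟩ := IH.2 ti' tag' eol' acc' hsome
              refine ⟨by omega, by simp at hle ⊢; omega, ?_⟩
              rw [hF1, heq]
              congr 1
              have hd : ti' - ti = (ti' - (ti + 1)) + 1 := by omega
              rw [hd, List.drop_succ_cons]
          · have h2c := h2
            simp at h2c
            cases he : PySem.List.pyGet? eops ((eol : Nat) : Int) with
            | none =>
              have hIeq : innerF syn eops (t :: t2 :: rest2) ti tag eol acc = none := by
                rw [innerF]; simp [h0c, hs, h2c, he]
              have hF2 : fRun syn eops (t2 :: rest2) (ti + 1) tag eol (acc ++ s ++ "@@" ++ " ") = none := by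
                rw [fRun]; simp [hs, h2c, he]
              refine ⟨fun _ => by rw [hF1]; exact hF2, fun ti' tag' eol' acc' h => ?_⟩
              rw [hIeq] at h; cases h
            | some e =>
              by_cases hb : ((ti + 1 : Nat) : Int) = e - 1
              · have hbc : (ti : Int) + 1 = e - 1 := by push_cast at hb; exact hb
                have hIeq : innerF syn eops (t :: t2 :: rest2) ti tag eol acc
                    = innerF syn eops rest2 (ti + 2) (tag + 1) (eol + 1) (acc ++ s ++ "@@" ++ " " ++ s ++ "\n") := by
                  rw [innerF]; simp [h0c, hs, h2c, he, hbc]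
                have hF2 : fRun syn eops (t2 :: rest2) (ti + 1) tag eol (acc ++ s ++ "@@" ++ " ")
                    = fRun syn eops rest2 (ti + 2) (tag + 1) (eol + 1) (acc ++ s ++ "@@" ++ " " ++ s ++ "\n") := by
                  rw [fRun]; simp [hs, h2c, he, hbc]
                rcases rest2 with _ | ⟨t3, rest3⟩
                · have hc := hct t (by simp)
                  rw [h0] at hc; cases hc
                · by_cases h3 : PySem.Str.isIn "@@" t3 = true
                  · have h3c := h3
                    simp at h3c
                    have IH := ih (t3 :: rest3) syn eops (ti + 2) (tag + 1) (eol + 1)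
                      (acc ++ s ++ "@@" ++ " " ++ s ++ "\n") t3
                      (by simp at hn ⊢; omega) (pv_ctail_tail _ _ (pv_ctail_tail _ _ hct)) (by simp) h3
                    refine ⟨fun hnone => ?_, fun ti' tag' eol' acc' hsome => ?_⟩
                    · rw [hIeq] at hnone
                      rw [hF1, hF2]
                      exact IH.1 hnone
                    · rw [hIeq] at hsome
                      obtain ⟨hlt, hle, heq⟩ := IH.2 ti' tag' eol' acc' hsome
                      refine ⟨by omega, by simp at hle ⊢; omega, ?_⟩
                      rw [hF1, hF2, heq]
                      congr 1
                      have hd : ti' - ti = (ti' - (ti + 2)) + 1 + 1 := by omega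
                      rw [hd, List.drop_succ_cons, List.drop_succ_cons]
                  · have h3c := h3
                    simp at h3c
                    have hIend : innerF syn eops (t3 :: rest3) (ti + 2) (tag + 1) (eol + 1)
                        (acc ++ s ++ "@@" ++ " " ++ s ++ "\n")
                        = some (ti + 2, tag + 1, eol + 1, acc ++ s ++ "@@" ++ " " ++ s ++ "\n") := by
                      rw [innerF]; simp [h3c]
                    refine ⟨fun hnone => ?_, fun ti' tag' eol' acc' hsome => ?_⟩
                    · rw [hIeq, hIend] at hnone; cases hnone
                    · rw [hIeq, hIend] at hsome
                      obtain ⟨h1', h2', h3', h4'⟩ := by simpa using hsome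
                      subst h1'; subst h2'; subst h3'; subst h4'
                      refine ⟨by omega, by simp only [List.length_cons]; omega, ?_⟩
                      rw [hF1, hF2]
                      congr 1
                      have hd : ti + 2 - ti = 2 := by omega
                      rw [hd]
                      rfl
              · have hbc : ¬((ti : Int) + 1 = e - 1) := by push_cast at hb; exact hb
                have hIeq : innerF syn eops (t :: t2 :: rest2) ti tag eol acc
                    = innerF syn eops rest2 (ti + 2) (tag + 1) eol (acc ++ s ++ "@@" ++ " " ++ s ++ " ") := by
                  rw [innerF]; simp [h0c, hs, h2c, he, hbc]
                have hF2 : fRun syn eops (t2 :: rest2) (ti + 1) tag eol (acc ++ s ++ "@@" ++ " ")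
                    = fRun syn eops rest2 (ti + 2) (tag + 1) eol (acc ++ s ++ "@@" ++ " " ++ s ++ " ") := by
                  rw [fRun]; simp [hs, h2c, he, hbc]
                rcases rest2 with _ | ⟨t3, rest3⟩
                · have hc := hct t (by simp)
                  rw [h0] at hc; cases hc
                · by_cases h3 : PySem.Str.isIn "@@" t3 = true
                  · have h3c := h3
                    simp at h3c
                    have IH := ih (t3 :: rest3) syn eops (ti + 2) (tag + 1) eol
                      (acc ++ s ++ "@@" ++ " " ++ s ++ " ") t3
                      (by simp at hn ⊢; omega) (pv_ctail_tail _ _ (pv_ctail_tail _ _ hct)) (by simp) h3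
                    refine ⟨fun hnone => ?_, fun ti' tag' eol' acc' hsome => ?_⟩
                    · rw [hIeq] at hnone
                      rw [hF1, hF2]
                      exact IH.1 hnone
                    · rw [hIeq] at hsome
                      obtain ⟨hlt, hle, heq⟩ := IH.2 ti' tag' eol' acc' hsome
                      refine ⟨by omega, by simp at hle ⊢; omega, ?_⟩
                      rw [hF1, hF2, heq]
                      congr 1
                      have hd : ti' - ti = (ti' - (ti + 2)) + 1 + 1 := by omega
                      rw [hd, List.drop_succ_cons, List.drop_succ_cons]
                  · have h3c := h3
                    simp at h3c
                    have hIend : innerF syn eops (t3 :: rest3) (ti + 2) (tag + 1) eol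
                        (acc ++ s ++ "@@" ++ " " ++ s ++ " ")
                        = some (ti + 2, tag + 1, eol, acc ++ s ++ "@@" ++ " " ++ s ++ " ") := by
                      rw [innerF]; simp [h3c]
                    refine ⟨fun hnone => ?_, fun ti' tag' eol' acc' hsome => ?_⟩
                    · rw [hIeq, hIend] at hnone; cases hnone
                    · rw [hIeq, hIend] at hsome
                      obtain ⟨h1', h2', h3', h4'⟩ := by simpa using hsome
                      subst h1'; subst h2'; subst h3'; subst h4'
                      refine ⟨by omega, by simp only [List.length_cons]; omega, ?_⟩
                      rw [hF1, hF2]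
                      congr 1
                      have hd : ti + 2 - ti = 2 := by omega
                      rw [hd]
                      rfl

theorem pv_ao : ∀ (fuel : Nat) (pre rest syn : List String) (eops : List Int) (tag eol : Nat) (acc : String),
    rest.length < fuel → Ctail rest →
    aOuter (pre ++ rest) syn eops fuel pre.length tag eol acc = fRun syn eops rest pre.length tag eol acc := by
  intro fuel
  induction fuel with
  | zero => intro pre rest syn eops tag eol acc h; omega
  | succ fuel ih =>
    intro pre rest syn eops tag eol acc hlen hct
    rcases rest with _ | ⟨t, rest'⟩
    · rw [aOuter, fRun]
      rw [if_neg (by simp)]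
    · have hget : PySem.List.pyGet? (pre ++ t :: rest') ((pre.length : Nat) : Int) = some t := by
        simpa using pv_tok_get pre (t :: rest') 0
      rw [aOuter]
      rw [if_pos (by simp)]
      simp only [hget]
      by_cases h1 : PySem.Str.isIn "@@" t = true
      · simp only [h1, if_true]
        have hin := pv_in ((pre ++ t :: rest').length + 1) pre (t :: rest') syn eops tag eol acc
          (by simp)
        rw [hin]
        have hinf := pv_inf (t :: rest').length (t :: rest') syn eops pre.length tag eol acc t
          le_rfl hct (by simp) h1
        cases hI : innerF syn eops (t :: rest') pre.length tag eol acc with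
        | none =>
          rw [hinf.1 hI]
        | some q =>
          obtain ⟨ti', tag', eol', acc'⟩ := q
          obtain ⟨hlt, hle, heq⟩ := hinf.2 ti' tag' eol' acc' hI
          simp only [hI]
          rw [heq]
          obtain ⟨k, hk⟩ : ∃ k, k = ti' - pre.length := ⟨_, rfl⟩
          have hk1 : 1 ≤ k := by omega
          have hkle : k ≤ rest'.length + 1 := by simp at hle; omega
          have hsplit : pre ++ t :: rest' = (pre ++ (t :: rest').take k) ++ (t :: rest').drop k := by
            rw [List.append_assoc, List.take_append_drop]
          have hlen' : ti' = (pre ++ (t :: rest').take k).length := by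
            simp
            omega
          rw [← hk, hsplit, hlen']
          exact ih (pre ++ (t :: rest').take k) ((t :: rest').drop k) syn eops tag' eol' acc'
            (by simp at hlen ⊢; omega) (pv_ctail_drop _ _ hct)
      · have h1f : PySem.Str.isIn "@@" t = false := by simpa using h1
        simp only [h1f, Bool.false_eq_true, if_false]
        rw [fRun]
        cases hs : PySem.List.pyGet? syn ((tag : Nat) : Int) with
        | none => simp [hs]
        | some s =>
          simp only [hs]
          cases he : PySem.List.pyGet? eops ((eol : Nat) : Int) with
          | none =>
            have h1fc : PySem.Chars.isIn ['@', '@'] t.toList = false := by simpa using h1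
            simp [h1fc, he]
          | some e =>
            simp only [h1f, Bool.false_eq_true, if_false]
            by_cases hb : ((pre.length : Nat) : Int) = e - 1
            · simp only [hb, if_true]
              have hre : pre ++ t :: rest' = (pre ++ [t]) ++ rest' := by simp
              have hl1 : pre.length + 1 = (pre ++ [t]).length := by simp
              rw [hre, hl1, ih (pre ++ [t]) rest' syn eops (tag + 1) (eol + 1) _
                (by simp at hlen ⊢; omega) (pv_ctail_tail _ _ hct)]
            · simp only [hb, if_false]
              have hre : pre ++ t :: rest' = (pre ++ [t]) ++ rest' := by simp
              have hl1 : pre.length + 1 = (pre ++ [t]).length := by simp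
              rw [hre, hl1, ih (pre ++ [t]) rest' syn eops (tag + 1) eol _
                (by simp at hlen ⊢; omega) (pv_ctail_tail _ _ hct)]

-- ---------------------------------------------------------------------------
-- Part 3: the flat scan is B's line-by-line walk
-- ---------------------------------------------------------------------------

theorem pv_app2 (a b : String) : a ++ b ++ "@@" ++ " " = a ++ b ++ "@@ " := by
  apply String.ext
  simp

theorem pv_fl : ∀ (v : List String) (i L : Nat) (rest syn : List String) (eops : List Int) (ti0 tag eol : Nat) (acc : String),
    v ≠ [] → i + v.length = L →
    (∀ t ∈ v.getLast?, PySem.Str.isIn "@@" t = false) →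
    PySem.List.pyGet? eops ((eol : Nat) : Int) = some ((ti0 + L : Nat) : Int) →
    fRun syn eops (v ++ rest) (ti0 + i) tag eol acc =
      (match bToks syn ((L : Int) - 1) v i tag acc with
       | none => none
       | some (tag', out') => fRun syn eops rest (ti0 + L) tag' (eol + 1) out') := by
  intro v
  induction v with
  | nil => intro i L rest syn eops ti0 tag eol acc hne; exact absurd rfl hne
  | cons t v' ih =>
    intro i L rest syn eops ti0 tag eol acc _ hiL hlast he
    rw [List.cons_append, fRun, bToks]
    cases hs : PySem.List.pyGet? syn ((tag : Nat) : Int) with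
    | none => rfl
    | some s =>
      dsimp only
      by_cases h1 : PySem.Str.isIn "@@" t = true
      · rcases v' with _ | ⟨t2, v''⟩
        · have hl := hlast t (by simp)
          rw [h1] at hl; cases hl
        · rw [if_pos h1, if_pos h1]
          have hidx : ti0 + i + 1 = ti0 + (i + 1) := by omega
          rw [pv_app2, hidx]
          exact ih (i + 1) L rest syn eops ti0 tag eol (acc ++ s ++ "@@ ") (by simp) (by simp at hiL ⊢; omega)
            (by intro x hx; exact hlast x (by rwa [List.getLast?_cons_cons])) he
      · have h1f : PySem.Str.isIn "@@" t = false := by simpa using h1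
        rw [if_neg h1, if_neg h1, he]
        dsimp only
        rcases v' with _ | ⟨t2, v''⟩
        · have hL : i + 1 = L := by simpa using hiL
          have hb : ((ti0 + i : Nat) : Int) = ((ti0 + L : Nat) : Int) - 1 := by omega
          have hb2 : ((i : Nat) : Int) = (L : Int) - 1 := by omega
          rw [if_pos hb, if_pos hb2, bToks]
          have hidx : ti0 + i + 1 = ti0 + L := by omega
          rw [List.nil_append, hidx]
        · have hlen2 : i + (v''.length + 2) = L := by simpa using hiL
          have hb : ¬(((ti0 + i : Nat) : Int) = ((ti0 + L : Nat) : Int) - 1) := by omega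
          have hb2 : ¬(((i : Nat) : Int) = (L : Int) - 1) := by omega
          rw [if_neg hb, if_neg hb2]
          have hidx : ti0 + i + 1 = ti0 + (i + 1) := by omega
          rw [hidx]
          exact ih (i + 1) L rest syn eops ti0 (tag + 1) eol (acc ++ s ++ " ") (by simp) (by simp at hiL ⊢; omega)
            (by intro x hx; exact hlast x (by rwa [List.getLast?_cons_cons])) he

-- lines with no tokens form a suffix
def ESuf : List String → Prop
  | [] => True
  | l :: rest => (PySem.Str.split₀ l = [] → ∀ l' ∈ rest, PySem.Str.split₀ l' = []) ∧ ESuf rest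

theorem pv_bLines_empty (syn : List String) : ∀ (L : List String) (tag : Nat) (out : String),
    (∀ l ∈ L, PySem.Str.split₀ l = []) → bLines syn L tag out = some (tag, out) := by
  intro L
  induction L with
  | nil => intro tag out _; rfl
  | cons l L ih =>
    intro tag out h
    rw [bLines]
    have h0 : PySem.Str.split₀ l = [] := h l (by simp)
    simp only [h0]
    rw [bToks]
    exact ih tag out (fun l' hl' => h l' (by simp [hl']))

theorem pv_fb : ∀ (L syn : List String) (eops : List Int) (s tag eol : Nat) (acc : String),
    (∀ l ∈ L, ∀ t ∈ (PySem.Str.split₀ l).getLast?, PySem.Str.isIn "@@" t = false) →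
    ESuf L →
    List.drop eol eops = pyAccumGo (s : Int) (L.map (fun l => ((PySem.Str.split₀ l).length : Int))) →
    fRun syn eops ((L.map PySem.Str.split₀).flatten) s tag eol acc = (bLines syn L tag acc).map (fun p => p.2) := by
  intro L
  induction L with
  | nil => intro syn eops s tag eol acc _ _ _; rfl
  | cons l L' ih =>
    intro syn eops s tag eol acc h1 h2 h3
    rcases hu : PySem.Str.split₀ l with _ | ⟨t, u'⟩
    · -- the line has no tokens: every later line is empty too
      have hrest : ∀ l' ∈ L', PySem.Str.split₀ l' = [] := h2.1 hu
      have hfl : ((l :: L').map PySem.Str.split₀).flatten = [] := by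
        simp only [List.map_cons, List.flatten_cons, hu, List.nil_append]
        rw [List.flatten_eq_nil_iff]
        intro ys hys
        obtain ⟨l', hl', rfl⟩ := List.mem_map.mp hys
        exact hrest l' hl'
      rw [hfl, fRun, bLines]
      simp only [hu]
      rw [bToks]
      dsimp only
      rw [pv_bLines_empty syn L' tag acc hrest]
      rfl
    · -- the line has tokens
      have hune : PySem.Str.split₀ l ≠ [] := by rw [hu]; simp
      have hacc : List.drop eol eops
          = ((s : Int) + ((PySem.Str.split₀ l).length : Int)) ::
            pyAccumGo ((s : Int) + ((PySem.Str.split₀ l).length : Int)) (L'.map (fun l => ((PySem.Str.split₀ l).length : Int))) := by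
        rw [h3]
        rw [List.map_cons, pyAccumGo]
      have hget : PySem.List.pyGet? eops ((eol : Nat) : Int)
          = some ((s + (PySem.Str.split₀ l).length : Nat) : Int) := by
        rw [PySem.List.pyGet?_natCast]
        rw [← List.head?_drop, hacc]
        simp
      have hfl : ((l :: L').map PySem.Str.split₀).flatten
          = PySem.Str.split₀ l ++ (L'.map PySem.Str.split₀).flatten := by
        simp
      rw [hfl]
      have hfl2 := pv_fl (PySem.Str.split₀ l) 0 ((PySem.Str.split₀ l).length)
        ((L'.map PySem.Str.split₀).flatten) syn eops s tag eol acc hune (by omega)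
        (h1 l (by simp)) hget
      rw [Nat.add_zero] at hfl2
      rw [hfl2, bLines]
      cases hb : bToks syn (((PySem.Str.split₀ l).length : Int) - 1) (PySem.Str.split₀ l) 0 tag acc with
      | none => rfl
      | some q =>
        obtain ⟨tag', out'⟩ := q
        dsimp only
        rw [ih syn eops (s + (PySem.Str.split₀ l).length) tag' (eol + 1) out'
          (fun x hx => h1 x (by simp [hx])) h2.2 ?_]
        rw [← List.tail_drop, h3, List.map_cons, pyAccumGo]
        simp only [List.tail_cons]
        congr 1

-- ---------------------------------------------------------------------------
-- Part 4: extracting the line conditions from Pre_ ∧ ¬D_, and the assembly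
-- ---------------------------------------------------------------------------

theorem pv_esuf_of : ∀ (L : List String),
    (∀ j, j < L.length → ∀ i, i < j → PySem.Str.split₀ (L.getD i "") = [] → PySem.Str.split₀ (L.getD j "") = []) →
    ESuf L := by
  intro L
  induction L with
  | nil => intro _; trivial
  | cons l L ih =>
    intro h
    refine ⟨?_, ?_⟩
    · intro h0 l' hl'
      obtain ⟨j, hj, hjl⟩ := List.getElem_of_mem hl'
      have := h (j + 1) (by simp; omega) 0 (by omega)
      simp only [List.getD_cons_zero, List.getD_cons_succ] at this
      rw [List.getD_eq_getElem?_getD, List.getElem?_eq_getElem hj, Option.getD_some, hjl] at this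
      exact this h0
    · apply ih
      intro j hj i hij hi
      have := h (j + 1) (by simp; omega) (i + 1) (by omega)
      simp only [List.getD_cons_succ] at this
      exact this hi

theorem pv_main (syn : List String) (text : String)
    (hpre : Pre_align_synsets_bpe syn text) (hD : ¬ D_align_synsets_bpe syn text) :
    align_synsets_bpe syn text = align_synsets_bpe_alt syn text := by
  obtain ⟨hcount, hct0⟩ := hpre
  have hct : Ctail (PySem.Str.split₀ text) := hct0
  unfold D_align_synsets_bpe at hD
  push_neg at hD
  have hflat : PySem.Str.split₀ text = ((PySem.Str.splitlines text).map PySem.Str.split₀).flatten :=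
    pv_split_flatten text
  -- every empty line is only followed by empty lines
  have hG1 : ESuf (PySem.Str.splitlines text) := by
    apply pv_esuf_of
    intro j hj i hij hempty
    by_contra hne
    obtain ⟨t, ht, _⟩ := hD j hj hne i hij
    rw [hempty] at ht
    simp at ht
  -- no line ends in a '@@' token
  have hG2 : ∀ l ∈ PySem.Str.splitlines text, ∀ t ∈ (PySem.Str.split₀ l).getLast?, PySem.Str.isIn "@@" t = false := by
    intro l hl
    obtain ⟨i, hi, rfl⟩ := List.getElem_of_mem hl
    by_cases hlater : ∃ j, i < j ∧ j < (PySem.Str.splitlines text).length ∧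
        PySem.Str.split₀ ((PySem.Str.splitlines text).getD j "") ≠ []
    · obtain ⟨j, hij, hj, hne⟩ := hlater
      have hnd := hD j hj hne i hij
      have hgd : (PySem.Str.splitlines text).getD i "" = (PySem.Str.splitlines text)[i] := by
        rw [List.getD_eq_getElem?_getD, List.getElem?_eq_getElem hi, Option.getD_some]
      rw [hgd] at hnd
      intro t ht
      obtain ⟨t', ht', hnt⟩ := hnd
      rw [Option.mem_def] at ht ht'
      rw [ht] at ht'
      injection ht' with h'
      subst h'
      simpa using hnt
    · push_neg at hlater
      intro t ht
      have hemp : ∀ b ∈ (PySem.Str.splitlines text).drop (i + 1), PySem.Str.split₀ b = [] := by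
        intro b hb
        obtain ⟨k, hk, hbk⟩ := List.getElem_of_mem hb
        rw [List.getElem_drop] at hbk
        have hlen : i + 1 + k < (PySem.Str.splitlines text).length := by
          rw [List.length_drop] at hk
          omega
        have := hlater (i + 1 + k) (by omega) hlen
        rw [List.getD_eq_getElem?_getD, List.getElem?_eq_getElem hlen, Option.getD_some, hbk] at this
        exact this
      have hlastt : (PySem.Str.split₀ text).getLast? = (PySem.Str.split₀ ((PySem.Str.splitlines text)[i])).getLast? := by
        rw [hflat]
        conv_lhs =>
          rw [show PySem.Str.splitlines text
              = (PySem.Str.splitlines text).take i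
                ++ (PySem.Str.splitlines text)[i] :: (PySem.Str.splitlines text).drop (i + 1) by
            rw [List.getElem_cons_drop, List.take_append_drop]]
        rw [List.map_append, List.map_cons, List.flatten_append, List.flatten_cons]
        have hnil : (((PySem.Str.splitlines text).drop (i + 1)).map PySem.Str.split₀).flatten = [] := by
          rw [List.flatten_eq_nil_iff]
          intro ys hys
          obtain ⟨b, hb, rfl⟩ := List.mem_map.mp hys
          exact hemp b hb
        rw [hnil, List.append_nil]
        apply List.getLast?_append_of_ne_nil
        intro h0
        rw [h0] at ht
        simp at ht
      exact pv_ctail_last (PySem.Str.split₀ text) t hct (by rw [hlastt]; exact ht)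
  -- assembly
  have hao := pv_ao ((PySem.Str.split₀ text).length + 1) [] (PySem.Str.split₀ text) syn
    (pyAccum ((PySem.Str.splitlines text).map (fun l => ((PySem.Str.split₀ l).length : Int)))) 0 0 "" (by omega) hct
  simp only [List.nil_append, List.length_nil] at hao
  have hfb := pv_fb (PySem.Str.splitlines text) syn
    (pyAccum ((PySem.Str.splitlines text).map (fun l => ((PySem.Str.split₀ l).length : Int)))) 0 0 0 "" hG2 hG1
    (by simp [pyAccum])
  rw [← hflat] at hfb
  unfold align_synsets_bpe align_synsets_bpe_alt
  dsimp only
  rw [hao, hfb]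
  cases bLines syn (PySem.Str.splitlines text) 0 "" with
  | none => rfl
  | some q => rfl


-- ===== VERDICT (by name: the statement is the Claim_ definition above) =====
theorem align_synsets_bpe_spec : Claim_unchanged_align_synsets_bpe := by
  intro synsets text_bpe _hdom hpre hD
  exact pv_main synsets text_bpe hpre hD

theorem align_synsets_bpe_changed : Claim_changed_align_synsets_bpe := by
  unfold Claim_changed_align_synsets_bpe; decide
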